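-- pv_equiv track=rewrite | github.com/avasileios/Advent-of-Code-Solutions | 2017/Day-24-Challenge/day24p2.py | find_longest_strongest_bridge
-- ===== SOURCE A (Python) =====
-- def find_longest_strongest_bridge(adjacency):
--     """
--     Performs DFS to find the longest bridge. Tie-breaks with strength.
--     """
--     max_length = 0
--     max_strength_of_longest = 0
--
--     # Stack stores: (current_port, current_strength, current_length, set_of_used_component_ids)
--     stack = [(0, 0, 0, set())]
--
--     while stack:
--         current_port, current_strength, current_length, used = stack.pop()
--
--         # Check if this path is the new best (Longer, or Same Length & Stronger)
--         if current_length > max_length: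
--             max_length = current_length
--             max_strength_of_longest = current_strength
--         elif current_length == max_length:
--             max_strength_of_longest = max(max_strength_of_longest, current_strength)
--
--         # Try to extend the bridge
--         if current_port in adjacency:
--             for next_port, comp_id in adjacency[current_port]:
--                 if comp_id not in used:
--                     # Calculate new metrics
--                     component_strength = current_port + next_port
--
--                     new_used = used.copy()
--                     new_used.add(comp_id)
--
--                     # Add next state to stack
--                     stack.append((next_port,
--                                   current_strength + component_strength,
--                                   current_length + 1,
--                                   new_used))
--
--     return max_strength_of_longest
-- ===== SOURCE B (Python) =====
-- def find_longest_strongest_bridge(adjacency):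
--     """
--     Recursive DFS with backtracking: dfs(port, used) returns the best
--     (length, strength) pair reachable from `port`; answer is its strength.
--     """
--     def dfs(port, used):
--         best = (0, 0)
--         for next_port, comp_id in adjacency.get(port, []):
--             if comp_id not in used:
--                 used.add(comp_id)
--                 clen, cstr = dfs(next_port, used)
--                 used.remove(comp_id)
--                 cand = (1 + clen, port + next_port + cstr)
--                 if cand > best:
--                     best = cand
--         return best
--     return dfs(0, set())[1]
-- ===== Notes on version B (the rewrite author's own statement) =====
-- stated objective: alternative
-- what changed: Replaces A's explicit stack of (port,strength,length,used-set-copy) states with a recursive dfs(port,used) that returns the best (length,strength) pair reachable from a port, combining candidates by lexicographic max and backtracking on a single mutable set.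
import Mathlib
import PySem

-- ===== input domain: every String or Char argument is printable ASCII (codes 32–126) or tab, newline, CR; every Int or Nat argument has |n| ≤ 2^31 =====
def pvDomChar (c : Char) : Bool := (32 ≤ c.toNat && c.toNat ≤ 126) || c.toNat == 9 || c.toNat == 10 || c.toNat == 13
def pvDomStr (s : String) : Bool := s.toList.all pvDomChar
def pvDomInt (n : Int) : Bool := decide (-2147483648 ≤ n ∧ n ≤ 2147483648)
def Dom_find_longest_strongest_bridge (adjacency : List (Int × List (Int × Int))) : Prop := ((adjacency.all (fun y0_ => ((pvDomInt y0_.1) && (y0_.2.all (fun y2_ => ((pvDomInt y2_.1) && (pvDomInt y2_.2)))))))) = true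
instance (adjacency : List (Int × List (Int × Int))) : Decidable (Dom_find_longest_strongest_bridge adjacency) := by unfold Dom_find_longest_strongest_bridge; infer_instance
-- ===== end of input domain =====

-- B re-implements A's explicit-stack DFS as a recursive dfs(port, used) returning the best
-- (length, strength) pair (lexicographic max with backtracking); same return value, alternative decomposition.
-- (B's Python backtracks on one mutable set — used.add before / used.remove after the recursive call;
-- the Lean port passes the persistently-extended set to the recursive call, the same set value.)

-- all (next_port, comp_id) pairs occurring in adjacency values (termination bookkeeping)
def pvPairs (adjacency : List (Int × List (Int × Int))) : List (Int × Int) :=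
  (adjacency.map (fun kv => kv.2)).flatten

-- the distinct component ids
def pvIds (adjacency : List (Int × List (Int × Int))) : List Int :=
  PySem.List.dedup ((pvPairs adjacency).map Prod.snd)

-- number of component ids not yet used
def pvFree (adjacency : List (Int × List (Int × Int))) (used : List Int) : Nat :=
  ((pvIds adjacency).filter (fun c => decide (c ∉ used))).length

def pvC (adjacency : List (Int × List (Int × Int))) : Nat := (pvPairs adjacency).length

-- weight of one stack entry, and of a whole stack
def pvW (adjacency : List (Int × List (Int × Int))) (used : List Int) : Nat :=
  (pvC adjacency + 1) ^ (pvFree adjacency used)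

def pvM (adjacency : List (Int × List (Int × Int)))
    (stack : List (Int × Int × Int × List Int)) : Nat :=
  (stack.map (fun e => pvW adjacency e.2.2.2)).sum

lemma pvFree_add_lt (adjacency : List (Int × List (Int × Int))) (used : List Int) (cid : Int)
    (h1 : cid ∈ pvIds adjacency) (h2 : cid ∉ used) :
    pvFree adjacency (PySem.Set.add used cid) < pvFree adjacency used := by
  unfold pvFree
  rw [PySem.Set.add_of_not_mem h2]
  have he : ((pvIds adjacency).filter (fun c => decide (c ∉ used ++ [cid])))
      = ((pvIds adjacency).filter (fun c => decide (c ∉ used))).filter (fun c => decide (c ≠ cid)) := by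
    rw [List.filter_filter]
    apply List.filter_congr
    intro x _
    simp [and_comm]
  rw [he]
  apply List.length_filter_lt_length_iff_exists.mpr
  exact ⟨cid, by simp [h1, h2], by simp⟩

lemma pvMem_pairs (adjacency : List (Int × List (Int × Int))) (port : Int)
    (l : List (Int × Int)) (h : (PySem.Dict.mk adjacency).get? port = some l) :
    ∀ pc ∈ l, pc ∈ pvPairs adjacency := by
  intro pc hpc
  have hm : (port, l) ∈ adjacency := by
    have := PySem.Dict.mem_items_of_get?_eq_some (PySem.Dict.mk adjacency) h
    simpa [PySem.Dict.items] using this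
  unfold pvPairs
  simp only [List.mem_flatten, List.mem_map]
  exact ⟨l, ⟨(port, l), hm, rfl⟩, hpc⟩

lemma pvGetD_subset (adjacency : List (Int × List (Int × Int))) (port : Int) :
    ∀ pc ∈ (PySem.Dict.mk adjacency).getD port [], pc ∈ pvPairs adjacency := by
  intro pc hpc
  rw [PySem.Dict.getD_eq_get?_getD] at hpc
  cases h : (PySem.Dict.mk adjacency).get? port with
  | none => rw [h] at hpc; simp at hpc
  | some l => rw [h] at hpc; exact pvMem_pairs adjacency port l h pc hpc

lemma pvSnd_mem_ids (adjacency : List (Int × List (Int × Int))) (pc : Int × Int)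
    (h : pc ∈ pvPairs adjacency) : pc.2 ∈ pvIds adjacency := by
  unfold pvIds
  rw [PySem.List.mem_dedup]
  exact List.mem_map_of_mem h

lemma pvM_cons (adjacency : List (Int × List (Int × Int))) (e : Int × Int × Int × List Int)
    (st : List (Int × Int × Int × List Int)) :
    pvM adjacency (e :: st) = pvW adjacency e.2.2.2 + pvM adjacency st := by
  simp [pvM]

lemma pvM_foldl_le (adjacency : List (Int × List (Int × Int)))
    (port stren len : Int) (used : List Int) (X : Nat)
    (l : List (Int × Int))
    (hX : ∀ pc ∈ l, pc.2 ∉ used → pvW adjacency (PySem.Set.add used pc.2) ≤ X) :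
    ∀ rest, pvM adjacency (l.foldl (fun st pc =>
        if pc.2 ∉ used then
          (pc.1, stren + (port + pc.1), len + 1, PySem.Set.add used pc.2) :: st
        else st) rest)
      ≤ pvM adjacency rest + l.length * X := by
  induction l with
  | nil => intro rest; simp
  | cons pc l' ih =>
    intro rest
    simp only [List.foldl_cons]
    by_cases hm : pc.2 ∉ used
    · rw [if_pos hm]
      calc pvM adjacency (l'.foldl _ ((pc.1, stren + (port + pc.1), len + 1, PySem.Set.add used pc.2) :: rest))
          ≤ pvM adjacency ((pc.1, stren + (port + pc.1), len + 1, PySem.Set.add used pc.2) :: rest) + l'.length * X :=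
            ih (fun q hq => hX q (List.mem_cons_of_mem _ hq)) _
        _ = pvW adjacency (PySem.Set.add used pc.2) + pvM adjacency rest + l'.length * X := by
            rw [pvM_cons]
        _ ≤ X + pvM adjacency rest + l'.length * X := by
            have := hX pc (List.mem_cons_self) hm
            omega
        _ ≤ pvM adjacency rest + (pc :: l').length * X := by
            simp [List.length_cons]; ring_nf; omega
    · rw [if_neg hm]
      have := ih (fun q hq => hX q (List.mem_cons_of_mem _ hq)) rest
      have hlen : (pc :: l').length * X = l'.length * X + X := by simp [List.length_cons]; ring
      omega

lemma pvLen_le_C (adjacency : List (Int × List (Int × Int))) (port : Int)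
    (l : List (Int × Int)) (h : (PySem.Dict.mk adjacency).get? port = some l) :
    l.length ≤ pvC adjacency := by
  have hm : (port, l) ∈ adjacency := by
    have := PySem.Dict.mem_items_of_get?_eq_some (PySem.Dict.mk adjacency) h
    simpa [PySem.Dict.items] using this
  have hml : l ∈ adjacency.map (fun kv => kv.2) := List.mem_map_of_mem hm
  unfold pvC pvPairs
  rw [List.length_flatten]
  have : l.length ∈ (adjacency.map (fun kv => kv.2)).map List.length := List.mem_map_of_mem hml
  exact List.le_sum_of_mem this

lemma pvM_newStack_lt (adjacency : List (Int × List (Int × Int)))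
    (port stren len : Int) (used : List Int) (rest : List (Int × Int × Int × List Int)) :
    pvM adjacency
      (match (PySem.Dict.mk adjacency).get? port with
       | none => rest
       | some l => l.foldl (fun st pc =>
           if pc.2 ∉ used then
             (pc.1, stren + (port + pc.1), len + 1, PySem.Set.add used pc.2) :: st
           else st) rest)
      < pvM adjacency ((port, stren, len, used) :: rest) := by
  have hWpos : 1 ≤ pvW adjacency used := Nat.one_le_pow _ _ (by omega)
  rw [pvM_cons]
  cases hget : (PySem.Dict.mk adjacency).get? port with
  | none => simpa using by omega
  | some l =>
    simp only []
    by_cases hf : pvFree adjacency used = 0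
    · have hX : ∀ pc ∈ l, pc.2 ∉ used → pvW adjacency (PySem.Set.add used pc.2) ≤ 0 := by
        intro pc hpc hm
        exfalso
        have := pvFree_add_lt adjacency used pc.2
          (pvSnd_mem_ids adjacency pc (pvMem_pairs adjacency port l hget pc hpc)) hm
        omega
      have := pvM_foldl_le adjacency port stren len used 0 l hX rest
      omega
    · set f := pvFree adjacency used with hfdef
      have hf1 : 1 ≤ f := by omega
      have hX : ∀ pc ∈ l, pc.2 ∉ used →
          pvW adjacency (PySem.Set.add used pc.2) ≤ (pvC adjacency + 1) ^ (f - 1) := by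
        intro pc hpc hm
        have hlt := pvFree_add_lt adjacency used pc.2
          (pvSnd_mem_ids adjacency pc (pvMem_pairs adjacency port l hget pc hpc)) hm
        exact Nat.pow_le_pow_right (by omega) (by omega)
      have h1 := pvM_foldl_le adjacency port stren len used ((pvC adjacency + 1) ^ (f - 1)) l hX rest
      have h2 : l.length * (pvC adjacency + 1) ^ (f - 1) < pvW adjacency used := by
        have hl := pvLen_le_C adjacency port l hget
        have hp1 : 1 ≤ (pvC adjacency + 1) ^ (f - 1) := Nat.one_le_pow _ _ (by omega)
        have hsplit : pvW adjacency used = (pvC adjacency + 1) ^ (f - 1) * (pvC adjacency + 1) := by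
          rw [pvW, ← hfdef, ← pow_succ]
          congr 1
          omega
        have hmul : l.length * (pvC adjacency + 1) ^ (f - 1)
            ≤ pvC adjacency * (pvC adjacency + 1) ^ (f - 1) :=
          Nat.mul_le_mul_right _ hl
        nlinarith
      omega

-- ===== PORT A =====
-- the if/elif chain updating (max_length, max_strength_of_longest)
def pvUpd (best p : Int × Int) : Int × Int :=
  if p.1 > best.1 then p
  else if p.1 = best.1 then (best.1, max best.2 p.2)
  else best

-- the while-stack loop of A; stack entries are (port, strength, length, used), head = top of stack
def pvLoopA (adjacency : List (Int × List (Int × Int)))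
    (stack : List (Int × Int × Int × List Int)) (maxL maxS : Int) : Int :=
  match stack with
  | [] => maxS
  | (port, stren, len, used) :: rest =>
    let best := pvUpd (maxL, maxS) (len, stren)
    let newStack :=
      match (PySem.Dict.mk adjacency).get? port with
      | none => rest
      | some l => l.foldl (fun st pc =>
          if pc.2 ∉ used then
            (pc.1, stren + (port + pc.1), len + 1, PySem.Set.add used pc.2) :: st
          else st) rest
    pvLoopA adjacency newStack best.1 best.2
termination_by pvM adjacency stack
decreasing_by
  exact pvM_newStack_lt adjacency port stren len used rest

def find_longest_strongest_bridge (adjacency : List (Int × List (Int × Int))) : Int :=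
  pvLoopA adjacency [(0, 0, 0, PySem.Set.empty)] 0 0

-- ===== PORT B =====
-- lexicographic max of two (length, strength) pairs: 'if cand > best: best = cand'
def pvPmax (a b : Int × Int) : Int × Int :=
  if a.1 < b.1 ∨ (a.1 = b.1 ∧ a.2 < b.2) then b else a

-- the for-loop of B's dfs over the remaining candidates; `hc` only feeds termination
def pvGo (adjacency : List (Int × List (Int × Int))) (port : Int)
    (cands : List (Int × Int)) (used : List Int) (best : Int × Int)
    (hc : ∀ pc ∈ cands, pc ∈ pvPairs adjacency) : Int × Int :=
  match h : cands with
  | [] => best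
  | (np, cid) :: rest =>
    if hm : cid ∈ used then
      pvGo adjacency port rest used best (fun pc hpc => hc pc (by simp [hpc]))
    else
      let c := pvGo adjacency np ((PySem.Dict.mk adjacency).getD np [])
        (PySem.Set.add used cid) (0, 0) (pvGetD_subset adjacency np)
      pvGo adjacency port rest used (pvPmax best (1 + c.1, port + np + c.2))
        (fun pc hpc => hc pc (by simp [hpc]))
termination_by (pvFree adjacency used, cands.length)
decreasing_by
  · exact Prod.Lex.right _ (by simp)
  · exact Prod.Lex.left _ _ (pvFree_add_lt adjacency used cid
      (pvSnd_mem_ids adjacency (np, cid) (hc (np, cid) (by simp))) hm)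
  · exact Prod.Lex.right _ (by simp)

def pvDfs (adjacency : List (Int × List (Int × Int))) (port : Int) (used : List Int) : Int × Int :=
  pvGo adjacency port ((PySem.Dict.mk adjacency).getD port []) used (0, 0)
    (pvGetD_subset adjacency port)

def find_longest_strongest_bridge_alt (adjacency : List (Int × List (Int × Int))) : Int :=
  (pvDfs adjacency 0 PySem.Set.empty).2

-- ===== PRECONDITION & SPEC =====
def Spec_find_longest_strongest_bridge (adjacency : List (Int × List (Int × Int))) (out : Int) : Prop := out = find_longest_strongest_bridge_alt adjacency
instance (adjacency : List (Int × List (Int × Int))) (out : Int) : Decidable (Spec_find_longest_strongest_bridge adjacency out) := by unfold Spec_find_longest_strongest_bridge; infer_instance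

-- ===== CLAIM (what is proved, stated in full; the proofs are below) =====
def Claim_equal_find_longest_strongest_bridge : Prop := ∀ (adjacency : List (Int × List (Int × Int))), Dom_find_longest_strongest_bridge adjacency → Spec_find_longest_strongest_bridge adjacency (find_longest_strongest_bridge adjacency)

-- ===== LEMMAS AND PROOFS =====

lemma pvPmax_self (a : Int × Int) : pvPmax a a = a := by
  simp [pvPmax]

lemma pvPmax_assoc (a b c : Int × Int) :
    pvPmax (pvPmax a b) c = pvPmax a (pvPmax b c) := by
  obtain ⟨a1, a2⟩ := a; obtain ⟨b1, b2⟩ := b; obtain ⟨c1, c2⟩ := c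
  simp only [pvPmax]
  split_ifs <;> simp_all [Prod.ext_iff] <;> omega

lemma pvUpd_eq (b p : Int × Int) : pvUpd b p = pvPmax b p := by
  obtain ⟨b1, b2⟩ := b; obtain ⟨p1, p2⟩ := p
  simp only [pvUpd, pvPmax]
  split_ifs <;> (simp_all [Prod.ext_iff, max_def]; try omega)

-- the body of B's dfs loop as a fold step
def pvStepB (adjacency : List (Int × List (Int × Int))) (port : Int) (used : List Int)
    (b : Int × Int) (pc : Int × Int) : Int × Int :=
  if pc.2 ∈ used then b
  else pvPmax b (1 + (pvDfs adjacency pc.1 (PySem.Set.add used pc.2)).1,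
                 port + pc.1 + (pvDfs adjacency pc.1 (PySem.Set.add used pc.2)).2)

lemma pvGo_eq_foldl (adjacency : List (Int × List (Int × Int))) (port : Int) :
    ∀ (cands : List (Int × Int)) (used : List Int) (best : Int × Int)
      (hc : ∀ pc ∈ cands, pc ∈ pvPairs adjacency),
      pvGo adjacency port cands used best hc
        = cands.foldl (pvStepB adjacency port used) best := by
  intro cands
  induction cands with
  | nil => intro used best hc; simp [pvGo]
  | cons pc rest ih =>
    intro used best hc
    obtain ⟨np, cid⟩ := pc
    rw [pvGo]
    by_cases hm : cid ∈ used
    · rw [dif_pos hm, ih]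
      simp [pvStepB, hm]
    · rw [dif_neg hm, ih]
      have hd : pvGo adjacency np ((PySem.Dict.mk adjacency).getD np [])
          (PySem.Set.add used cid) (0, 0) (pvGetD_subset adjacency np)
          = pvDfs adjacency np (PySem.Set.add used cid) := rfl
      simp only [List.foldl_cons, pvStepB, hm, hd]
      simp

lemma pvDfs_eq_foldl (adjacency : List (Int × List (Int × Int))) (port : Int) (used : List Int) :
    pvDfs adjacency port used
      = ((PySem.Dict.mk adjacency).getD port []).foldl (pvStepB adjacency port used) (0, 0) := by
  unfold pvDfs
  rw [pvGo_eq_foldl]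

-- componentwise addition of (length, strength) pairs
def pvAdd (q p : Int × Int) : Int × Int := (q.1 + p.1, q.2 + p.2)

lemma pvAdd_pmax (q a b : Int × Int) :
    pvAdd q (pvPmax a b) = pvPmax (pvAdd q a) (pvAdd q b) := by
  obtain ⟨q1, q2⟩ := q; obtain ⟨a1, a2⟩ := a; obtain ⟨b1, b2⟩ := b
  simp only [pvAdd, pvPmax]
  split_ifs <;> (simp_all [Prod.ext_iff]; try omega)

-- absolute best value reachable from a stack entry
def pvAbs (adjacency : List (Int × List (Int × Int))) (e : Int × Int × Int × List Int) : Int × Int :=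
  (e.2.2.1 + (pvDfs adjacency e.1 e.2.2.2).1, e.2.1 + (pvDfs adjacency e.1 e.2.2.2).2)

def pvF (adjacency : List (Int × List (Int × Int)))
    (b : Int × Int) (e : Int × Int × Int × List Int) : Int × Int :=
  pvPmax b (pvAbs adjacency e)

-- generic fold lemmas for pvPmax-shaped steps
lemma pvFoldl_pull {α : Type} (f : Int × Int → α → Int × Int)
    (hf : ∀ b a x, f (pvPmax b a) x = pvPmax b (f a x)) :
    ∀ (l : List α) (a b : Int × Int),
      List.foldl f (pvPmax b a) l = pvPmax b (List.foldl f a l) := by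
  intro l
  induction l with
  | nil => intro a b; rfl
  | cons x l ih =>
    intro a b
    simp only [List.foldl_cons]
    rw [hf, ih]

lemma pvFoldl_swap {α : Type} (f : Int × Int → α → Int × Int)
    (hf : ∀ b x y, f (f b x) y = f (f b y) x) :
    ∀ (l : List α) (b : Int × Int) (x : α),
      List.foldl f (f b x) l = f (List.foldl f b l) x := by
  intro l
  induction l with
  | nil => intro b x; rfl
  | cons y l ih =>
    intro b x
    simp only [List.foldl_cons]
    rw [hf, ih]

lemma pvFoldl_reverse {α : Type} (f : Int × Int → α → Int × Int)
    (hf : ∀ b x y, f (f b x) y = f (f b y) x) :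
    ∀ (l : List α) (b : Int × Int),
      List.foldl f b l.reverse = List.foldl f b l := by
  intro l
  induction l with
  | nil => intro b; rfl
  | cons x l ih =>
    intro b
    simp only [List.reverse_cons, List.foldl_append, List.foldl_cons, List.foldl_nil, ih]
    rw [← pvFoldl_swap f hf l b x]

lemma pvF_pull (adjacency : List (Int × List (Int × Int))) (b a : Int × Int) x :
    pvF adjacency (pvPmax b a) x = pvPmax b (pvF adjacency a x) := by
  simp only [pvF, pvPmax_assoc]

lemma pvF_swap (adjacency : List (Int × List (Int × Int))) (b : Int × Int) x y :
    pvF adjacency (pvF adjacency b x) y = pvF adjacency (pvF adjacency b y) x := by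
  simp only [pvF, pvPmax_assoc]
  congr 1
  obtain ⟨a1, a2⟩ := pvAbs adjacency x; obtain ⟨b1, b2⟩ := pvAbs adjacency y
  simp only [pvPmax]
  split_ifs <;> simp_all [Prod.ext_iff] <;> omega

-- the child entry pushed by A for candidate pc from entry (port, stren, len, used)
def pvChild (port stren len : Int) (used : List Int) (pc : Int × Int) : Int × Int × Int × List Int :=
  (pc.1, stren + (port + pc.1), len + 1, PySem.Set.add used pc.2)

-- A's inner for-loop = reversed filtered-mapped children on top of rest
lemma pvFoldl_push (port stren len : Int) (used : List Int) :
    ∀ (l : List (Int × Int)) (rest : List (Int × Int × Int × List Int)),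
      l.foldl (fun st pc =>
          if pc.2 ∉ used then
            (pc.1, stren + (port + pc.1), len + 1, PySem.Set.add used pc.2) :: st
          else st) rest
        = ((l.filter (fun pc => decide (pc.2 ∉ used))).map (pvChild port stren len used)).reverse ++ rest := by
  intro l
  induction l with
  | nil => intro rest; simp
  | cons pc l' ih =>
    intro rest
    by_cases hm : pc.2 ∉ used
    · simp only [List.foldl_cons, if_pos hm, ih]
      simp [hm, pvChild]
    · simp only [List.foldl_cons, if_neg hm, ih]
      simp only [List.filter_cons, decide_eq_false hm]
      simp

lemma pvAdd_foldl (adjacency : List (Int × List (Int × Int))) (port : Int) (used : List Int)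
    (q : Int × Int) :
    ∀ (cands : List (Int × Int)) (acc : Int × Int),
      pvAdd q (cands.foldl (pvStepB adjacency port used) acc)
        = cands.foldl (fun b pc => if pc.2 ∈ used then b
            else pvPmax b (pvAdd q (1 + (pvDfs adjacency pc.1 (PySem.Set.add used pc.2)).1,
                    port + pc.1 + (pvDfs adjacency pc.1 (PySem.Set.add used pc.2)).2)))
            (pvAdd q acc) := by
  intro cands
  induction cands with
  | nil => intro acc; rfl
  | cons pc l ih =>
    intro acc
    simp only [List.foldl_cons, pvStepB]
    by_cases hm : pc.2 ∈ used
    · simp only [if_pos hm, ih]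
    · simp only [if_neg hm, ih, pvAdd_pmax]

-- key lemma: the dfs value of an entry = fold of pvF over its pushed children, seeded with the entry itself
lemma pvAbs_expand (adjacency : List (Int × List (Int × Int)))
    (port stren len : Int) (used : List Int) :
    pvAbs adjacency (port, stren, len, used)
      = List.foldl (pvF adjacency) (len, stren)
          ((((PySem.Dict.mk adjacency).getD port []).filter (fun pc => decide (pc.2 ∉ used))).map
            (pvChild port stren len used)) := by
  have h1 : pvAbs adjacency (port, stren, len, used)
      = pvAdd (len, stren) (pvDfs adjacency port used) := rfl
  rw [h1, pvDfs_eq_foldl, pvAdd_foldl, List.foldl_map, List.foldl_filter]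
  have hinit : pvAdd (len, stren) ((0 : Int), (0 : Int)) = (len, stren) := by
    simp [pvAdd]
  rw [hinit]
  congr 1
  funext b pc
  by_cases hm : pc.2 ∈ used
  · simp [hm]
  · rw [if_neg hm]
    have h2 : (decide (pc.2 ∉ used)) = true := by simpa using hm
    rw [if_pos h2]
    simp only [pvF]
    congr 1
    simp only [pvAdd, pvAbs, pvChild, Prod.mk.injEq]
    constructor <;> ring

-- one step of A's loop, at the level of folds
lemma pvStack_step (adjacency : List (Int × List (Int × Int)))
    (port stren len : Int) (used : List Int) (maxL maxS : Int)
    (rest : List (Int × Int × Int × List Int)) :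
    List.foldl (pvF adjacency) (pvUpd (maxL, maxS) (len, stren))
      (match (PySem.Dict.mk adjacency).get? port with
       | none => rest
       | some l => l.foldl (fun st pc =>
           if pc.2 ∉ used then
             (pc.1, stren + (port + pc.1), len + 1, PySem.Set.add used pc.2) :: st
           else st) rest)
      = List.foldl (pvF adjacency) (pvF adjacency (maxL, maxS) (port, stren, len, used)) rest := by
  rw [pvUpd_eq]
  have hF : pvF adjacency (maxL, maxS) (port, stren, len, used)
      = pvPmax (maxL, maxS) (pvAbs adjacency (port, stren, len, used)) := rfl
  cases hget : (PySem.Dict.mk adjacency).get? port with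
  | none =>
    have hd : pvAbs adjacency (port, stren, len, used) = (len, stren) := by
      have hD : pvDfs adjacency port used = (0, 0) := by
        rw [pvDfs_eq_foldl, PySem.Dict.getD_eq_get?_getD, hget]
        rfl
      simp [pvAbs, hD]
    rw [hF, hd]
  | some l =>
    have hgetD : (PySem.Dict.mk adjacency).getD port [] = l := by
      rw [PySem.Dict.getD_eq_get?_getD, hget]
      rfl
    dsimp only
    rw [pvFoldl_push, List.foldl_append,
      pvFoldl_reverse (pvF adjacency) (pvF_swap adjacency),
      pvFoldl_pull (pvF adjacency) (pvF_pull adjacency), hF]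
    congr 1
    rw [pvAbs_expand, hgetD]

-- the main loop invariant
lemma pvLoopA_eq (adjacency : List (Int × List (Int × Int))) :
    ∀ (stack : List (Int × Int × Int × List Int)) (maxL maxS : Int),
      pvLoopA adjacency stack maxL maxS
        = (List.foldl (pvF adjacency) (maxL, maxS) stack).2 := by
  intro stack maxL maxS
  fun_induction pvLoopA adjacency stack maxL maxS with
  | case1 => rfl
  | case2 maxL maxS port stren len used rest best newStack ih =>
    rw [ih, List.foldl_cons, ← pvStack_step adjacency port stren len used maxL maxS rest]
    rfl

lemma pvPmax_foldl_id {α : Type} (f : Int × Int → α → Int × Int)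
    (hf : ∀ b a x, pvPmax b a = a → pvPmax b (f a x) = f a x) :
    ∀ (l : List α) (a b : Int × Int), pvPmax b a = a →
      pvPmax b (List.foldl f a l) = List.foldl f a l := by
  intro l
  induction l with
  | nil => intro a b h; exact h
  | cons x l ih =>
    intro a b h
    simp only [List.foldl_cons]
    exact ih _ _ (hf b a x h)

lemma pvStepB_mono (adjacency : List (Int × List (Int × Int))) (port : Int) (used : List Int) :
    ∀ (b a : Int × Int) (x : Int × Int), pvPmax b a = a →
      pvPmax b (pvStepB adjacency port used a x) = pvStepB adjacency port used a x := by
  intro b a x h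
  unfold pvStepB
  by_cases hm : x.2 ∈ used
  · rw [if_pos hm]; exact h
  · rw [if_neg hm, ← pvPmax_assoc, h]

-- ===== VERDICT (by name: the statement is the Claim_ definition above) =====
theorem find_longest_strongest_bridge_spec : Claim_equal_find_longest_strongest_bridge := by
  intro adjacency _
  unfold Spec_find_longest_strongest_bridge find_longest_strongest_bridge
    find_longest_strongest_bridge_alt
  rw [pvLoopA_eq]
  simp only [List.foldl_cons, List.foldl_nil]
  have habs : pvAbs adjacency (0, 0, 0, PySem.Set.empty) = pvDfs adjacency 0 PySem.Set.empty := by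
    simp [pvAbs]
  have hid : pvPmax (0, 0) (pvDfs adjacency 0 PySem.Set.empty)
      = pvDfs adjacency 0 PySem.Set.empty := by
    rw [pvDfs_eq_foldl]
    exact pvPmax_foldl_id _ (pvStepB_mono adjacency 0 PySem.Set.empty) _ _ _ (pvPmax_self _)
  simp only [pvF, habs, hid]
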